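-- pv_equiv track=rewrite | github.com/gohxuezhe/AdventofCode2023 | 14.py | part1
-- ===== SOURCE A (Python) =====
-- def part1(arr):
--     res = 0
--
--     dish = [''.join([arr[i][j] for i in range(len(arr))]) for j in range(len(arr[0]))]
--     max_load = len(dish[0])
--
--     for lane in dish:
--         track, seek = 0, 0
--         while seek < max_load:
--             if lane[seek] == 'O':
--                 res += max_load - track
--                 track += 1
--             elif lane[seek] == '#':
--                 track = seek + 1
--             seek += 1
--
--     return res
-- ===== SOURCE B (Python) =====
-- def part1(arr):
--     rows = len(arr)
--     cols = len(arr[0])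
--     next_free = [0] * cols
--     res = 0
--     for i, row in enumerate(arr):
--         new_nf = []
--         for j, nf in enumerate(next_free):
--             c = row[j]
--             if c == 'O':
--                 res += rows - nf
--                 new_nf.append(nf + 1)
--             elif c == '#':
--                 new_nf.append(i + 1)
--             else:
--                 new_nf.append(nf)
--         next_free = new_nf
--     return res
-- ===== Notes on version B (the rewrite author's own statement) =====
-- stated objective: alternative
-- what changed: B drops A's transpose-then-scan-each-column pass and instead sweeps the grid once in row-major order, maintaining a per-column next_free settle vector updated row by row.
import Mathlib
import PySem

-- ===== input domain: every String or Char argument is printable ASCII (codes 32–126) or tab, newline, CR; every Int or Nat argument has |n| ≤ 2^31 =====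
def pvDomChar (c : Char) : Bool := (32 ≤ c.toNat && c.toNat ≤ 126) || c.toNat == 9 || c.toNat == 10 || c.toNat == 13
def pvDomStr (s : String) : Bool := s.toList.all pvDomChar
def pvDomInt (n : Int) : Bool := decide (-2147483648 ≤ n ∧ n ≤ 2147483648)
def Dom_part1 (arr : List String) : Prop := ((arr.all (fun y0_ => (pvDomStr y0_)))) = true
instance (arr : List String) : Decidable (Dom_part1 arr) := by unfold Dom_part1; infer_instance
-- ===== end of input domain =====

-- B replaces A's transpose-then-per-column scans by a single row-major sweep with a per-column
-- settle vector (objective: alternative decomposition, same asymptotic cost).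

-- ===== PORT A =====
-- arr[i][j] (IndexError → default, excluded by Pre_)
def pvCell (arr : List String) (i j : Int) : Char :=
  PySem.List.pyGetD (PySem.List.pyGetD arr i "").toList j ' '

def part1 (arr : List String) : Int :=
  let dish : List (List Char) :=
    (PySem.List.pyRange 0 (PySem.Str.len (PySem.List.pyGetD arr 0 "")) 1).map (fun j =>
      (PySem.List.pyRange 0 (arr.length : Int) 1).map (fun i => pvCell arr i j))
  let maxLoad : Int := ((PySem.List.pyGetD dish 0 []).length : Int)
  dish.foldl (fun res lane =>
    ((PySem.List.pyRange 0 maxLoad 1).foldl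
      (fun (st : Int × Int) seek =>
        if PySem.List.pyGetD lane seek ' ' = 'O' then (st.1 + (maxLoad - st.2), st.2 + 1)
        else if PySem.List.pyGetD lane seek ' ' = '#' then (st.1, seek + 1)
        else st)
      (res, 0)).1) 0

-- ===== PORT B =====
def part1_alt (arr : List String) : Int :=
  let rows : Int := (arr.length : Int)
  let cols : Int := PySem.Str.len (PySem.List.pyGetD arr 0 "")
  ((PySem.List.enumerate arr 0).foldl
    (fun (st : Int × List Int) (irow : Int × String) =>
      (PySem.List.enumerate st.2 0).foldl
        (fun (q : Int × List Int) (jnf : Int × Int) =>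
          if PySem.List.pyGetD irow.2.toList jnf.1 ' ' = 'O' then
            (q.1 + (rows - jnf.2), q.2 ++ [jnf.2 + 1])
          else if PySem.List.pyGetD irow.2.toList jnf.1 ' ' = '#' then
            (q.1, q.2 ++ [irow.1 + 1])
          else (q.1, q.2 ++ [jnf.2]))
        (st.1, ([] : List Int)))
    (0, List.replicate cols.toNat 0)).1

-- ===== PRECONDITION & SPEC =====
-- Pre_ excludes exactly the inputs where Python A raises IndexError: the empty list (arr[0]),
-- an empty first row (dish[0] on the empty transpose), or a row shorter than the first row (arr[i][j]).
def Pre_part1 (arr : List String) : Prop :=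
  arr ≠ [] ∧ 0 < (arr.headD "").toList.length ∧
    ∀ s ∈ arr, (arr.headD "").toList.length ≤ s.toList.length
instance (arr : List String) : Decidable (Pre_part1 arr) := by unfold Pre_part1; infer_instance
def pvWitness_part1 : List String := ["O#.", ".O.", "..O"]

def Spec_part1 (arr : List String) (out : Int) : Prop := out = part1_alt arr
instance (arr : List String) (out : Int) : Decidable (Spec_part1 arr out) := by unfold Spec_part1; infer_instance

-- ===== CLAIM (what is proved, stated in full; the proofs are below) =====
def Claim_equal_part1 : Prop := ∀ (arr : List String), Dom_part1 arr → Pre_part1 arr → Spec_part1 arr (part1 arr)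

-- ===== LEMMAS AND PROOFS =====

-- the per-cell transition both programs perform: state (res-so-far, track/next_free)
def pvStep (N : Int) (st : Int × Int) (ic : Int × Char) : Int × Int :=
  if ic.2 = 'O' then (st.1 + (N - st.2), st.2 + 1)
  else if ic.2 = '#' then (st.1, ic.1 + 1) else st

-- first i entries of column j
def pvCol (arr : List String) (j i : Nat) : List Char :=
  (List.range i).map (fun (r : Nat) => pvCell arr (r : Int) (j : Int))

-- state of column j after the first i rows
def pvP (arr : List String) (N : Int) (j i : Nat) : Int × Int :=
  List.foldl (pvStep N) (0, 0) (PySem.List.enumerate (pvCol arr j i) 0)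

theorem pvStep_add (N : Int) (r t : Int) (x : Int × Char) :
    pvStep N (r, t) x = (r + (pvStep N (0, t) x).1, (pvStep N (0, t) x).2) := by
  simp only [pvStep]
  split_ifs <;> simp


theorem fold_pvStep_add (N : Int) (l : List (Int × Char)) : ∀ (r t : Int),
    List.foldl (pvStep N) (r, t) l
      = (r + (List.foldl (pvStep N) (0, t) l).1, (List.foldl (pvStep N) (0, t) l).2) := by
  induction l with
  | nil => intro r t; simp
  | cons x l ih =>
    intro r t
    simp only [List.foldl_cons]
    rw [pvStep_add, ih]
    have h2 := ih (pvStep N (0, t) x).1 (pvStep N (0, t) x).2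
    rw [Prod.mk.eta] at h2
    rw [h2]
    simp [add_assoc]


theorem foldRange_eq (N : Int) (lane : List Char) : ∀ (pre : List Char) (st : Int × Int),
    (PySem.List.pyRange (pre.length : Int) ((pre.length : Int) + (lane.length : Int)) 1).foldl
      (fun (st : Int × Int) seek =>
        if PySem.List.pyGetD (pre ++ lane) seek ' ' = 'O' then (st.1 + (N - st.2), st.2 + 1)
        else if PySem.List.pyGetD (pre ++ lane) seek ' ' = '#' then (st.1, seek + 1)
        else st) st
    = (PySem.List.enumerate lane (pre.length : Int)).foldl (pvStep N) st := by
  intro pre st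
  induction lane generalizing pre st with
  | nil =>
    rw [PySem.List.pyRange_one_eq_nil (by simp)]
    simp [PySem.List.enumerate_nil]
  | cons c lane ih =>
    rw [PySem.List.pyRange_one_cons (by simp)]
    rw [PySem.List.enumerate_cons]
    simp only [List.foldl_cons]
    have hc : PySem.List.pyGetD (pre ++ c :: lane) ((pre.length : Int)) ' ' = c := by
      rw [PySem.List.pyGetD_natCast]
      simp [List.getD]
    rw [hc]
    have h := ih (pre ++ [c]) (pvStep N st ((pre.length : Int), c))
    simp only [List.append_assoc, List.singleton_append, List.length_append,
      List.length_cons, List.length_nil, pvStep] at h ⊢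
    push_cast at h ⊢
    convert h using 3 <;> ring

theorem foldRange_eq_zero (N : Int) (lane : List Char) (st : Int × Int) :
    (PySem.List.pyRange 0 (lane.length : Int) 1).foldl
      (fun (st : Int × Int) seek =>
        if PySem.List.pyGetD lane seek ' ' = 'O' then (st.1 + (N - st.2), st.2 + 1)
        else if PySem.List.pyGetD lane seek ' ' = '#' then (st.1, seek + 1)
        else st) st
    = (PySem.List.enumerate lane 0).foldl (pvStep N) st := by
  simpa using foldRange_eq N lane [] st

theorem foldA (N : Int) (lanes : List (List Char)) : ∀ (r : Int),
    lanes.foldl (fun res lane => (List.foldl (pvStep N) (res, 0) (PySem.List.enumerate lane 0)).1) r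
      = r + (lanes.map (fun lane => (List.foldl (pvStep N) (0, 0) (PySem.List.enumerate lane 0)).1)).sum := by
  induction lanes with
  | nil => intro r; simp
  | cons lane lanes ih =>
    intro r
    simp only [List.foldl_cons, List.map_cons, List.sum_cons]
    rw [fold_pvStep_add]
    rw [ih]
    ring

theorem enum_append {α : Type} (xs : List α) : ∀ (ys : List α) (k : Int),
    PySem.List.enumerate (xs ++ ys) k
      = PySem.List.enumerate xs k ++ PySem.List.enumerate ys (k + xs.length) := by
  induction xs with
  | nil => intro ys k; simp [PySem.List.enumerate_nil]
  | cons x xs ih =>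
    intro ys k
    simp only [List.cons_append, PySem.List.enumerate_cons, ih, List.length_cons]
    have e : k + ((xs.length : Int) + 1) = k + 1 + (xs.length : Int) := by ring
    push_cast
    rw [e]

theorem enum_map_range {α : Type} (f : Nat → α) : ∀ (m : Nat),
    PySem.List.enumerate ((List.range m).map f) 0
      = (List.range m).map (fun (j : Nat) => ((j : Int), f j)) := by
  intro m
  induction m with
  | zero => simp [PySem.List.enumerate_nil]
  | succ m ih =>
    rw [List.range_succ, List.map_append, List.map_append, enum_append, ih]
    simp [PySem.List.enumerate_cons, PySem.List.enumerate_nil]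

theorem innerFold (ch : Int → Char) (N ii : Int) (ts : List Int) :
    ∀ (k : Int) (r : Int) (acc : List Int),
    List.foldl (fun (q : Int × List Int) (jnf : Int × Int) =>
        if ch jnf.1 = 'O' then (q.1 + (N - jnf.2), q.2 ++ [jnf.2 + 1])
        else if ch jnf.1 = '#' then (q.1, q.2 ++ [ii + 1])
        else (q.1, q.2 ++ [jnf.2]))
      (r, acc) (PySem.List.enumerate ts k)
    = (r + ((PySem.List.enumerate ts k).map (fun jnf => (pvStep N (0, jnf.2) (ii, ch jnf.1)).1)).sum,
       acc ++ (PySem.List.enumerate ts k).map (fun jnf => (pvStep N (0, jnf.2) (ii, ch jnf.1)).2)) := by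
  intro k r acc
  induction ts generalizing k r acc with
  | nil => simp [PySem.List.enumerate_nil]
  | cons t ts ih =>
    simp only [PySem.List.enumerate_cons, List.foldl_cons, List.map_cons, List.sum_cons]
    by_cases h1 : ch k = 'O'
    · simp only [h1, if_true]
      rw [ih]
      simp [pvStep, add_assoc, List.append_assoc]
    · by_cases h2 : ch k = '#'
      · simp only [h2, reduceIte]
        rw [ih]
        simp [pvStep, List.append_assoc]
      · simp only [h1, h2, reduceIte]
        rw [ih]
        simp [pvStep, h1, h2, List.append_assoc]

theorem pvP_succ (arr : List String) (N : Int) (j i : Nat) :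
    pvP arr N j (i + 1) = pvStep N (pvP arr N j i) ((i : Int), pvCell arr (i : Int) (j : Int)) := by
  unfold pvP pvCol
  rw [List.range_succ]
  simp only [List.map_append, List.map_cons, List.map_nil]
  rw [enum_append, List.foldl_append]
  simp [PySem.List.enumerate_cons, PySem.List.enumerate_nil]

theorem cell_row (arr : List String) (i : Nat) (h : i < arr.length) (j : Int) :
    PySem.List.pyGetD (arr[i]).toList j ' ' = pvCell arr (i : Int) j := by
  unfold pvCell
  rw [PySem.List.pyGetD_natCast, List.getD_eq_getElem _ _ h]

theorem pv_sum_map_add {α : Type} (l : List α) (f g : α → Int) :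
    (l.map (fun x => f x + g x)).sum = (l.map f).sum + (l.map g).sum := by
  induction l with
  | nil => simp
  | cons a l ih => simp [ih]; ring

theorem outerFold (arr : List String) (N : Int) (m : Nat) :
    ∀ (rest : List String) (i : Nat), rest = arr.drop i → i ≤ arr.length →
    List.foldl
      (fun (st : Int × List Int) (irow : Int × String) =>
        (PySem.List.enumerate st.2 0).foldl
          (fun (q : Int × List Int) (jnf : Int × Int) =>
            if PySem.List.pyGetD irow.2.toList jnf.1 ' ' = 'O' then
              (q.1 + (N - jnf.2), q.2 ++ [jnf.2 + 1])
            else if PySem.List.pyGetD irow.2.toList jnf.1 ' ' = '#' then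
              (q.1, q.2 ++ [irow.1 + 1])
            else (q.1, q.2 ++ [jnf.2]))
          (st.1, ([] : List Int)))
      (((List.range m).map (fun j => (pvP arr N j i).1)).sum,
        (List.range m).map (fun j => (pvP arr N j i).2))
      (PySem.List.enumerate rest (i : Int))
    = (((List.range m).map (fun j => (pvP arr N j arr.length).1)).sum,
        (List.range m).map (fun j => (pvP arr N j arr.length).2)) := by
  intro rest
  induction rest with
  | nil =>
    intro i hdrop hle
    have hi : i = arr.length := by
      have hl := congrArg List.length hdrop
      simp [List.length_drop] at hl
      omega
    subst hi
    simp [PySem.List.enumerate_nil]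
  | cons row rest ih =>
    intro i hdrop hle
    have hlen := congrArg List.length hdrop
    simp [List.length_drop] at hlen
    have hi : i < arr.length := by omega
    rw [List.drop_eq_getElem_cons hi] at hdrop
    obtain ⟨hrow, hrest⟩ : row = arr[i] ∧ rest = arr.drop (i + 1) := by
      injection hdrop with h1 h2; exact ⟨h1, h2⟩
    subst hrow
    rw [PySem.List.enumerate_cons]
    simp only [List.foldl_cons]
    rw [innerFold (fun z => PySem.List.pyGetD (arr[i]).toList z ' ') N ((i : Int))
        ((List.range m).map (fun j => (pvP arr N j i).2)) 0
        (((List.range m).map (fun j => (pvP arr N j i).1)).sum) []]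
    rw [enum_map_range]
    simp only [List.map_map, Function.comp_def, List.nil_append]
    simp only [cell_row arr i hi]
    have hsucc1 : ∀ j : Nat, (pvP arr N j (i + 1)).1
        = (pvP arr N j i).1
          + (pvStep N (0, (pvP arr N j i).2) ((i : Int), pvCell arr (i : Int) (j : Int))).1 := by
      intro j
      rw [pvP_succ, ← Prod.mk.eta (p := pvP arr N j i), pvStep_add]
    have hsucc2 : ∀ j : Nat, (pvP arr N j (i + 1)).2
        = (pvStep N (0, (pvP arr N j i).2) ((i : Int), pvCell arr (i : Int) (j : Int))).2 := by
      intro j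
      rw [pvP_succ, ← Prod.mk.eta (p := pvP arr N j i), pvStep_add]
    have e1 : (((List.range m).map (fun j => (pvP arr N j i).1)).sum
        + ((List.range m).map (fun j =>
            (pvStep N (0, (pvP arr N j i).2) ((i : Int), pvCell arr (i : Int) (j : Int))).1)).sum)
        = ((List.range m).map (fun j => (pvP arr N j (i + 1)).1)).sum := by
      simp only [hsucc1]
      rw [pv_sum_map_add]
    have e2 : ((List.range m).map (fun j =>
            (pvStep N (0, (pvP arr N j i).2) ((i : Int), pvCell arr (i : Int) (j : Int))).2))
        = (List.range m).map (fun j => (pvP arr N j (i + 1)).2) := by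
      simp only [hsucc2]
    rw [e1, e2]
    have e3 : ((i : Int) + 1) = (((i + 1 : Nat)) : Int) := by push_cast; ring
    rw [e3]
    exact ih (i + 1) hrest (by omega)

theorem pv_getD_map_range {α : Type} (f : Nat → α) (d : α) (m : Nat) (hm : 0 < m) :
    PySem.List.pyGetD ((List.range m).map f) 0 d = f 0 := by
  obtain ⟨m', rfl⟩ : ∃ m', m = m' + 1 := ⟨m - 1, by omega⟩
  rw [List.range_succ_eq_map]
  simp [PySem.List.pyGetD_zero]

theorem foldRange_eq_zero' (N : Int) (lane : List Char) (st : Int × Int) :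
    ((List.range lane.length).map (fun (k : Nat) => (k : Int))).foldl
      (fun (st : Int × Int) seek =>
        if PySem.List.pyGetD lane seek ' ' = 'O' then (st.1 + (N - st.2), st.2 + 1)
        else if PySem.List.pyGetD lane seek ' ' = '#' then (st.1, seek + 1)
        else st) st
    = (PySem.List.enumerate lane 0).foldl (pvStep N) st := by
  rw [← PySem.List.pyRange_zero_nat]
  exact foldRange_eq_zero N lane st

theorem foldRange_eq_len (N : Int) (n : Nat) (lane : List Char) (hl : lane.length = n)
    (st : Int × Int) :
    ((List.range n).map (fun (k : Nat) => (k : Int))).foldl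
      (fun (st : Int × Int) seek =>
        if PySem.List.pyGetD lane seek ' ' = 'O' then (st.1 + (N - st.2), st.2 + 1)
        else if PySem.List.pyGetD lane seek ' ' = '#' then (st.1, seek + 1)
        else st) st
    = (PySem.List.enumerate lane 0).foldl (pvStep N) st := by
  subst hl
  exact foldRange_eq_zero' N lane st

theorem pvP_zero (arr : List String) (N : Int) (j : Nat) : pvP arr N j 0 = (0, 0) := by
  simp [pvP, pvCol, PySem.List.enumerate_nil]

theorem part1_eq (arr : List String) (hm : 0 < (PySem.List.pyGetD arr 0 "").toList.length) :
    part1 arr = part1_alt arr := by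
  unfold part1 part1_alt
  simp only [PySem.Str.len_eq, PySem.List.pyRange_zero_nat, List.map_map]
  rw [pv_getD_map_range _ _ _ hm]
  simp only [Function.comp_def, List.length_map, List.length_range, Int.toNat_natCast]
  rw [List.foldl_ext _ (fun res (lane : List Char) =>
        (List.foldl (pvStep (arr.length : Int)) (res, 0) (PySem.List.enumerate lane 0)).1) 0
      (fun res lane hlane => by
        obtain ⟨j, hj, rfl⟩ := List.mem_map.mp hlane
        exact congrArg Prod.fst (foldRange_eq_len _ _ _ (by simp) _))]
  rw [foldA]
  rw [List.map_map]
  have hinit : ((0 : Int), List.replicate ((PySem.List.pyGetD arr 0 "").toList.length) (0 : Int))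
      = (((List.range ((PySem.List.pyGetD arr 0 "").toList.length)).map
            (fun j => (pvP arr (arr.length : Int) j 0).1)).sum,
         (List.range ((PySem.List.pyGetD arr 0 "").toList.length)).map
            (fun j => (pvP arr (arr.length : Int) j 0).2)) := by
    simp [pvP_zero]
  have hB := outerFold arr ((arr.length : Int)) ((PySem.List.pyGetD arr 0 "").toList.length)
      arr 0 (by simp) (by omega)
  simp only [Nat.cast_zero] at hB
  rw [hinit, hB]
  simp [pvP, pvCol, Function.comp_def]

-- ===== VERDICT =====
theorem part1_spec : Claim_equal_part1 := by
  intro arr _ hpre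
  unfold Spec_part1
  obtain ⟨hne, hlen, -⟩ := hpre
  have hm : 0 < (PySem.List.pyGetD arr 0 "").toList.length := by
    cases arr with
    | nil => simp at hne
    | cons a t => simpa [PySem.List.pyGetD_zero] using hlen
  exact part1_eq arr hm
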